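-- pv_equiv track=rewrite | github.com/4books/argorithm_python | simulation/2. 청소 로봇 1.py | solution
-- ===== SOURCE A (Python) =====
-- def solution(moves):
--     x = y = 0
--     dx = [-1, 0, 1, 0]
--     dy = [0, 1, 0, -1]
--     dir = ['U', 'R', 'D', 'L']
--     for c in moves:
--         for k in range(4):
--             if c == dir[k]:
--                 x = x + dx[k]
--                 y = y + dy[k]
--
--     return [x, y]
-- ===== SOURCE B (Python) =====
-- def solution(moves):
--     return [moves.count('D') - moves.count('U'),
--             moves.count('R') - moves.count('L')]
-- ===== Notes on version B (the rewrite author's own statement) =====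
-- stated objective: simpler
-- what changed: Replaces the per-move accumulation with its 4-way inner direction scan by four count() tallies and a closed-form subtraction of counts.
import Mathlib
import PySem

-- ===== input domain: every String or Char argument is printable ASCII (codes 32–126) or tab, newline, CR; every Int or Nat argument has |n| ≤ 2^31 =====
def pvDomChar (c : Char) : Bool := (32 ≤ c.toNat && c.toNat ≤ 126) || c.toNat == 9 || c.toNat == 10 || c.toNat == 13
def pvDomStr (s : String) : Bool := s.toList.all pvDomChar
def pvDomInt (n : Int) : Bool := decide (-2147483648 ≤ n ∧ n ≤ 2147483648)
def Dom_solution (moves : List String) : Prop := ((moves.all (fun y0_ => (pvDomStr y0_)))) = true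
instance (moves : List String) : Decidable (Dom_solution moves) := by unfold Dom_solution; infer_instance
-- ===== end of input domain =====

-- B replaces A's per-move accumulation with a 4-way inner scan by closed-form count tallies (simpler).


-- ===== PORT A =====
-- inner 'for k in range(4)' loop of A, transliterated over pyRange 0 4 1
def solutionStep (c : String) (st : Int × Int) : Int × Int :=
  (PySem.List.pyRange 0 4 1).foldl (fun st k =>
    if c == ((PySem.List.pyGet? ["U", "R", "D", "L"] k).getD "") then
      (st.1 + ((PySem.List.pyGet? ([-1, 0, 1, 0] : List Int) k).getD 0),
       st.2 + ((PySem.List.pyGet? ([0, 1, 0, -1] : List Int) k).getD 0))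
    else st) st

def solution (moves : List String) : List Int :=
  let st := moves.foldl (fun st c => solutionStep c st) (0, 0)
  [st.1, st.2]

-- ===== PORT B =====
def solution_alt (moves : List String) : List Int :=
  [(moves.count "D" : Int) - (moves.count "U" : Int),
   (moves.count "R" : Int) - (moves.count "L" : Int)]

-- ===== PRECONDITION & SPEC =====
def Spec_solution (moves : List String) (out : List Int) : Prop := out = solution_alt moves
instance (moves : List String) (out : List Int) : Decidable (Spec_solution moves out) := by unfold Spec_solution; infer_instance

-- ===== CLAIM (what is proved, stated in full; the proofs are below) =====
def Claim_equal_solution : Prop := ∀ (moves : List String), Dom_solution moves → Spec_solution moves (solution moves)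

-- ===== LEMMAS AND PROOFS =====
theorem solution_invariant (moves : List String) : ∀ (x y : Int),
    moves.foldl (fun st c => solutionStep c st) (x, y)
      = (x + (moves.count "D" : Int) - (moves.count "U" : Int),
         y + (moves.count "R" : Int) - (moves.count "L" : Int)) := by
  induction moves with
  | nil => intro x y; simp
  | cons m ms ih =>
    intro x y
    have hstep : solutionStep m (x, y)
        = (x + (if m == "D" then 1 else 0) - (if m == "U" then 1 else 0),
           y + (if m == "R" then 1 else 0) - (if m == "L" then 1 else 0)) := by
      simp only [solutionStep]
      have : PySem.List.pyRange 0 4 1 = [0, 1, 2, 3] := by decide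
      rw [this]
      simp only [List.foldl, PySem.List.pyGet?]
      by_cases h1 : m = "U" <;> by_cases h2 : m = "R" <;> by_cases h3 : m = "D" <;>
        by_cases h4 : m = "L" <;>
        simp_all [PySem.List.pyIdx?] <;> omega
    rw [List.foldl_cons, hstep, ih]
    simp only [List.count_cons]
    by_cases h1 : m = "U" <;> by_cases h2 : m = "R" <;> by_cases h3 : m = "D" <;>
      by_cases h4 : m = "L" <;> simp_all <;> omega

-- ===== VERDICT (by name: the statement is the Claim_ definition above) =====
theorem solution_spec : Claim_equal_solution := by
  intro moves _
  unfold Spec_solution solution solution_alt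
  rw [solution_invariant moves 0 0]
  simp
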